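-- pv_equiv track=rewrite | github.com/scott-robbins/Automata | Color/v1/imutils.py | ind2sub
-- ===== SOURCE A (Python) =====
-- def ind2sub(index,dims):
--     """
--     Given an index and array dimensions,
--     convert an index to [x,y] subscript pair.
--     :param index:
--     :param dims:
--     :return tuple - subscripts :
--     """
--     subs = []
--     ii = 0
--     for y in range(dims[1]):
--         for x in range(dims[0]):
--             if index==ii:
--                 subs = [x,y]
--             ii +=1
--     return subs
-- ===== SOURCE B (Python) =====
-- def ind2sub(index, dims):
--     """
--     Given an index and array dimensions,
--     convert an index to [x,y] subscript pair.
--     """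
--     d0, d1 = dims[0], dims[1]
--     if d0 > 0 and 0 <= index < d0 * d1:
--         return [index % d0, index // d0]
--     return []
-- ===== Notes on version B (the rewrite author's own statement) =====
-- stated objective: faster
-- what changed: Replaced the nested scan over all dims[0]*dims[1] cells with a direct divmod formula plus a bounds check, removing both loops.
import Mathlib
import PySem

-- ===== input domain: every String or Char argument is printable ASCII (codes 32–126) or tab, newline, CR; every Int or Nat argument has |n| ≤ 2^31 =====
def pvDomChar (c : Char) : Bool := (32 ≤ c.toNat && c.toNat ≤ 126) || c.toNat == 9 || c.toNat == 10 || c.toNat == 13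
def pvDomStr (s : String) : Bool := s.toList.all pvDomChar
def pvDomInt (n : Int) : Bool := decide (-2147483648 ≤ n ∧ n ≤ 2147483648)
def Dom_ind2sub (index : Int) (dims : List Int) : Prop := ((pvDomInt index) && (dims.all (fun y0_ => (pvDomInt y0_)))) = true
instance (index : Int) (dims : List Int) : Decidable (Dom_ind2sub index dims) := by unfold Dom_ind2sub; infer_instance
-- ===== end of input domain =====

-- B replaces A's nested scan over all dims[0]*dims[1] cells with a direct divmod formula plus a bounds check (faster).


-- ===== PORT A =====
-- dims[1] and dims[0] are in range by Pre_ind2sub (length ≥ 2), so pyGetD's default is never taken.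
def ind2sub (index : Int) (dims : List Int) : List Int :=
  ((PySem.List.pyRange 0 (PySem.List.pyGetD dims 1 0) 1).foldl
    (fun (st : List Int × Int) y =>
      (PySem.List.pyRange 0 (PySem.List.pyGetD dims 0 0) 1).foldl
        (fun st x => (if index = st.2 then [x, y] else st.1, st.2 + 1)) st)
    ([], 0)).1

-- ===== PORT B =====
def ind2sub_alt (index : Int) (dims : List Int) : List Int :=
  let d0 := PySem.List.pyGetD dims 0 0
  let d1 := PySem.List.pyGetD dims 1 0
  if 0 < d0 ∧ 0 ≤ index ∧ index < d0 * d1 then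
    [PySem.Int.mod index d0, PySem.Int.floordiv index d0]
  else []

-- ===== PRECONDITION & SPEC =====
-- Both Pythons raise IndexError on dims with fewer than two elements (dims[0]/dims[1]).
def Pre_ind2sub (index : Int) (dims : List Int) : Prop := 2 ≤ dims.length
instance (index : Int) (dims : List Int) : Decidable (Pre_ind2sub index dims) := by unfold Pre_ind2sub; infer_instance
def pvWitness_ind2sub : Int × List Int := (5, [3, 4])

def Spec_ind2sub (index : Int) (dims : List Int) (out : List Int) : Prop := out = ind2sub_alt index dims
instance (index : Int) (dims : List Int) (out : List Int) : Decidable (Spec_ind2sub index dims out) := by unfold Spec_ind2sub; infer_instance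

-- ===== CLAIM (what is proved, stated in full; the proofs are below) =====
def Claim_equal_ind2sub : Prop := ∀ (index : Int) (dims : List Int), Dom_ind2sub index dims → Pre_ind2sub index dims → Spec_ind2sub index dims (ind2sub index dims)

-- ===== LEMMAS AND PROOFS =====

-- ranges over a nonpositive bound are empty, so the bound may be replaced by its toNat
theorem pyRange_toNat (d : Int) : PySem.List.pyRange 0 d 1 = PySem.List.pyRange 0 (d.toNat : Int) 1 := by
  by_cases h : 0 ≤ d
  · rw [Int.toNat_of_nonneg h]
  · rw [PySem.List.pyRange_one_eq_nil (by omega), PySem.List.pyRange_one_eq_nil (by omega)]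

-- A's inner loop: one full row scan starting at counter ii either hits index (giving [index-ii, y]) or keeps subs.
theorem ind2sub_inner (index y : Int) (n : Nat) : ∀ (s : List Int) (ii : Int),
    (PySem.List.pyRange 0 (n : Int) 1).foldl
      (fun (st : List Int × Int) x => (if index = st.2 then [x, y] else st.1, st.2 + 1)) (s, ii)
    = ((if ii ≤ index ∧ index < ii + n then [index - ii, y] else s), ii + n) := by
  induction n with
  | zero =>
    intro s ii
    rw [PySem.List.pyRange_one_eq_nil (by omega), if_neg (by omega)]
    simp
  | succ n ih =>
    intro s ii
    have hcast : ((n + 1 : Nat) : Int) = (n : Int) + 1 := by push_cast; ring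
    rw [hcast, PySem.List.pyRange_one_succ_right (by omega), List.foldl_append, ih]
    simp only [List.foldl_cons, List.foldl_nil]
    by_cases h1 : index = ii + n
    · rw [if_pos h1, if_pos (by omega)]
      have hd : index - ii = (n : Int) := by omega
      rw [hd]
      simp only [Prod.mk.injEq]
      exact ⟨trivial, by ring⟩
    · rw [if_neg (fun hc => h1 hc)]
      simp only [Prod.mk.injEq]
      constructor
      · split_ifs with h2 h3 h3 <;> first | rfl | omega
      · ring

-- A's outer loop from the initial state: after m rows the counter is n*m and subs is the divmod answer if hit.
theorem ind2sub_outer (index : Int) (n : Nat) : ∀ (m : Nat),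
    (PySem.List.pyRange 0 (m : Int) 1).foldl
      (fun (st : List Int × Int) y =>
        (PySem.List.pyRange 0 (n : Int) 1).foldl
          (fun (st : List Int × Int) x => (if index = st.2 then [x, y] else st.1, st.2 + 1)) st)
      ([], 0)
    = ((if 0 ≤ index ∧ index < (n : Int) * m then [index % (n : Int), index / (n : Int)] else []),
        (n : Int) * m) := by
  intro m
  induction m with
  | zero =>
    rw [show (((0:Nat):Int)) = (0:Int) from rfl,
      PySem.List.pyRange_one_eq_nil (b := (0:Int)) (by omega), if_neg (by simp)]
    simp
  | succ m ih =>
    have hcast : ((m + 1 : Nat) : Int) = (m : Int) + 1 := by push_cast; ring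
    rw [hcast, PySem.List.pyRange_one_succ_right (b := (m:Int)) (by omega), List.foldl_append, ih]
    simp only [List.foldl_cons, List.foldl_nil]
    rw [ind2sub_inner]
    by_cases hn : n = 0
    · subst hn
      simp
    have hn' : (0:Int) < n := by exact_mod_cast Nat.pos_of_ne_zero hn
    simp only [Prod.mk.injEq]
    have hnm : (0:Int) ≤ (n:Int) * m := by positivity
    have e1 : (n:Int) * ((m:Int) + 1) = (n:Int) * m + n := by ring
    constructor
    · by_cases h1 : (n:Int) * m ≤ index ∧ index < (n:Int) * m + n
      · rw [if_pos h1, if_pos ⟨by linarith [h1.1], by linarith [h1.2]⟩]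
        have hr0 : 0 ≤ index % (n:Int) := Int.emod_nonneg index (by omega)
        have hrn : index % (n:Int) < n := Int.emod_lt_of_pos index hn'
        have heq : (n:Int) * (index / n) + index % n = index := Int.ediv_add_emod index n
        have hqle : index / (n:Int) ≤ m := by
          have h2 : (n:Int) * (index / n) < n * ((m:Int) + 1) := by linarith [h1.2]
          exact Int.lt_add_one_iff.mp (lt_of_mul_lt_mul_left h2 (by positivity))
        have hqge : (m:Int) ≤ index / n := by
          have e2 : (n:Int) * (index / n + 1) = (n:Int) * (index / n) + n := by ring
          have h2 : (n:Int) * m < n * (index / n + 1) := by linarith [h1.1]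
          exact Int.lt_add_one_iff.mp (lt_of_mul_lt_mul_left h2 (by positivity))
        have hq : index / (n:Int) = m := le_antisymm hqle hqge
        have hr : index % (n:Int) = index - n * m := by
          rw [hq] at heq; linarith
        rw [hq, hr]
      · rw [if_neg h1]
        push Not at h1
        split_ifs with h2 h3 h3
        · rfl
        · exfalso; push Not at h3; linarith [h3 h2.1, h2.2]
        · exfalso; push Not at h2; linarith [h1 (h2 h3.1), h3.2]
        · rfl
    · ring

-- closed form for A's nested fold, for arbitrary integer dims entries
theorem ind2sub_key (index d0 d1 : Int) :
    ((PySem.List.pyRange 0 d1 1).foldl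
      (fun (st : List Int × Int) y =>
        (PySem.List.pyRange 0 d0 1).foldl
          (fun st x => (if index = st.2 then [x, y] else st.1, st.2 + 1)) st)
      ([], 0)).1
    = if 0 < d0 ∧ 0 ≤ index ∧ index < d0 * d1 then
        [PySem.Int.mod index d0, PySem.Int.floordiv index d0]
      else [] := by
  rw [pyRange_toNat d1, pyRange_toNat d0, ind2sub_outer]
  by_cases h0 : 0 < d0
  · have hn : ((d0.toNat : Int)) = d0 := Int.toNat_of_nonneg (le_of_lt h0)
    by_cases h1 : 0 < d1
    · have hm : ((d1.toNat : Int)) = d1 := Int.toNat_of_nonneg (le_of_lt h1)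
      rw [hn, hm]
      split_ifs with ha hb hb
      · rw [PySem.Int.mod_eq_emod_of_pos h0, PySem.Int.floordiv_eq_ediv_of_pos h0]
      · exact absurd ⟨h0, ha⟩ hb
      · exact absurd ⟨hb.2.1, hb.2.2⟩ ha
      · rfl
    · have hm : d1.toNat = 0 := Int.toNat_of_nonpos (by omega)
      rw [hm]
      simp only [Nat.cast_zero, mul_zero]
      rw [if_neg (by omega), if_neg (by intro h; nlinarith [h.1, h.2.1, h.2.2])]
  · have hn : d0.toNat = 0 := Int.toNat_of_nonpos (by omega)
    rw [hn]
    simp only [Nat.cast_zero, zero_mul]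
    rw [if_neg (by omega), if_neg (by intro h; exact absurd h.1 h0)]

-- ===== VERDICT (by name: the statement is the Claim_ definition above) =====
theorem ind2sub_spec : Claim_equal_ind2sub := by
  intro index dims _ _
  unfold Spec_ind2sub ind2sub ind2sub_alt
  exact ind2sub_key index _ _
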